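-- pv_equiv track=rewrite | github.com/erikjohnson094/stockAnalysis | optimizeWeights.py | read_primary_keys
-- ===== SOURCE A (Python) =====
-- def read_primary_keys(state,ignores):
--     keyList=[]
--     for possibleKey in state.keys():
--         if possibleKey not in ignores:
--             keyList.append(possibleKey)
--     primaryKeys=[]
--     for i in range(len(keyList)):
--         for j in range(len(keyList)):
--             if i==j:
--                 primaryKey=keyList[i]
--             else:
--                 twoKeys=sorted([keyList[i],keyList[j]])
--                 primaryKey=twoKeys[0]+'^'+twoKeys[1]
--             if primaryKey not in primaryKeys:
--                 primaryKeys.append(primaryKey)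
--     return primaryKeys
-- ===== SOURCE B (Python) =====
-- def read_primary_keys(state, ignores):
--     keyList = [k for k in state.keys() if k not in ignores]
--     out = []
--     seen = set()
--     rest = keyList
--     while rest:
--         a, rest = rest[0], rest[1:]
--         if a not in seen:
--             seen.add(a)
--             out.append(a)
--         for b in rest:
--             pk = a + '^' + b if a <= b else b + '^' + a
--             if pk not in seen:
--                 seen.add(pk)
--                 out.append(pk)
--     return out
-- ===== Notes on version B (the rewrite author's own statement) =====
-- stated objective: simpler
-- what changed: Replaces the n*n index double loop with its i==j branch and list-membership dedup by a single pass over list suffixes: emit each key, then its '^'-joined pairs with the later keys only, deduplicating with a set; the redundant j<i half of A's scan disappears.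
import Mathlib
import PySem

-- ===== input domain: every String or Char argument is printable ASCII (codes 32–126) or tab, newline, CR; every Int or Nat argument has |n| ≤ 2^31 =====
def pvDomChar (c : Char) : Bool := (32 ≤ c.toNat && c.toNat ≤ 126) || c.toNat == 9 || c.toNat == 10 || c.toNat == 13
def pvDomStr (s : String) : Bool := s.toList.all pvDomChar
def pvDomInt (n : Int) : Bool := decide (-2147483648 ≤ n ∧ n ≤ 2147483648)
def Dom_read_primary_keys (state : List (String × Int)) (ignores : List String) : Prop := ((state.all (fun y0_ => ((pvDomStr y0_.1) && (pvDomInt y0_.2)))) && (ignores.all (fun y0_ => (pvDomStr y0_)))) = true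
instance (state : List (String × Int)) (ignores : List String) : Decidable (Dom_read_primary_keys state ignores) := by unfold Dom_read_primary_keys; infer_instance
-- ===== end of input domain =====

-- B replaces A's n×n index double loop (i==j branch, list-membership dedup) by one pass over
-- list suffixes emitting each key then its pairs with later keys only, deduplicating with a set.

-- ===== PORT A =====
def read_primary_keys (state : List (String × Int)) (ignores : List String) : List String :=
  let keyList := ((PySem.Dict.ofList state).keys).foldl
    (fun acc possibleKey => if possibleKey ∈ ignores then acc else acc ++ [possibleKey]) []
  (PySem.List.pyRange 0 (keyList.length : Int) 1).foldl (fun primaryKeys i =>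
    (PySem.List.pyRange 0 (keyList.length : Int) 1).foldl (fun primaryKeys j =>
      let primaryKey :=
        if i = j then PySem.List.pyGetD keyList i ""
        else
          let twoKeys := PySem.List.sorted
            [PySem.List.pyGetD keyList i "", PySem.List.pyGetD keyList j ""] (fun x => x) false
          PySem.List.pyGetD twoKeys 0 "" ++ "^" ++ PySem.List.pyGetD twoKeys 1 ""
      if primaryKey ∈ primaryKeys then primaryKeys else primaryKeys ++ [primaryKey])
      primaryKeys) []

-- ===== PORT B =====
def pvJoin (a b : String) : String := if a ≤ b then a ++ "^" ++ b else b ++ "^" ++ a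

def pvEmit (st : PySem.Set String × List String) (x : String) : PySem.Set String × List String :=
  if x ∈ st.1 then st else (PySem.Set.add st.1 x, st.2 ++ [x])

def pvRows : List String → PySem.Set String × List String → PySem.Set String × List String
  | [], st => st
  | a :: rest, st => pvRows rest (rest.foldl (fun st b => pvEmit st (pvJoin a b)) (pvEmit st a))

def read_primary_keys_alt (state : List (String × Int)) (ignores : List String) : List String :=
  let keyList := ((PySem.Dict.ofList state).keys).filter (fun k => !(ignores.contains k))
  (pvRows keyList (PySem.Set.empty, [])).2

-- ===== PRECONDITION & SPEC =====
def Spec_read_primary_keys (state : List (String × Int)) (ignores : List String) (out : List String) : Prop := out = read_primary_keys_alt state ignores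
instance (state : List (String × Int)) (ignores : List String) (out : List String) : Decidable (Spec_read_primary_keys state ignores out) := by unfold Spec_read_primary_keys; infer_instance

-- ===== CLAIM (what is proved, stated in full; the proofs are below) =====
def Claim_equal_read_primary_keys : Prop := ∀ (state : List (String × Int)) (ignores : List String), Dom_read_primary_keys state ignores → Spec_read_primary_keys state ignores (read_primary_keys state ignores)

-- ===== LEMMAS AND PROOFS =====

/-- A's dedup-append step. -/
def dstep (acc : List String) (x : String) : List String := if x ∈ acc then acc else acc ++ [x]

/-- B's rows, rewritten over a single list accumulator (proved equal to pvRows). -/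
def gRows : List String → List String → List String
  | [], acc => acc
  | a :: rest, acc => gRows rest (rest.foldl (fun acc b => dstep acc (pvJoin a b)) (dstep acc a))

theorem mem_dstep {acc : List String} {x y : String} (h : y ∈ acc) : y ∈ dstep acc x := by
  unfold dstep; split <;> simp [h]

theorem self_mem_dstep (acc : List String) (x : String) : x ∈ dstep acc x := by
  unfold dstep; split <;> simp_all

theorem mem_foldl_dstep {f : String → String} {l : List String} {acc : List String} {y : String}
    (h : y ∈ acc) : y ∈ l.foldl (fun acc x => dstep acc (f x)) acc := by
  induction l generalizing acc with
  | nil => exact h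
  | cons a t ih => exact ih (mem_dstep h)

theorem mem_foldl_dstep_of_mem {f : String → String} {l : List String} {acc : List String} {x : String}
    (h : x ∈ l) : f x ∈ l.foldl (fun acc x => dstep acc (f x)) acc := by
  induction l generalizing acc with
  | nil => cases h
  | cons a t ih =>
    simp only [List.foldl_cons]
    rcases List.mem_cons.mp h with rfl | h
    · exact mem_foldl_dstep (self_mem_dstep _ _)
    · exact ih h

theorem foldl_dstep_of_forall_mem {f : String → String} {l : List String} {acc : List String}
    (h : ∀ x ∈ l, f x ∈ acc) : l.foldl (fun acc x => dstep acc (f x)) acc = acc := by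
  induction l with
  | nil => rfl
  | cons a t ih =>
    have ha : dstep acc (f a) = acc := by unfold dstep; simp [h a (by simp)]
    simp only [List.foldl_cons, ha]
    exact ih (fun x hx => h x (by simp [hx]))

theorem pvJoin_comm (a b : String) : pvJoin a b = pvJoin b a := by
  unfold pvJoin
  by_cases hab : a ≤ b
  · by_cases hba : b ≤ a
    · have : a = b := le_antisymm hab hba
      subst this; rfl
    · rw [if_pos hab, if_neg hba]
  · have hba : b ≤ a := (le_total a b).resolve_left hab
    rw [if_neg hab, if_pos hba]

theorem pvEmit_eq (acc : List String) (x : String) :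
    pvEmit (acc, acc) x = (dstep acc x, dstep acc x) := by
  unfold pvEmit dstep
  by_cases h : x ∈ acc
  · simp [h]
  · simp [h]

theorem foldl_pvEmit (f : String → String) (l : List String) (acc : List String) :
    l.foldl (fun st b => pvEmit st (f b)) (acc, acc)
      = (l.foldl (fun acc b => dstep acc (f b)) acc, l.foldl (fun acc b => dstep acc (f b)) acc) := by
  induction l generalizing acc with
  | nil => rfl
  | cons a t ih => simp only [List.foldl_cons, pvEmit_eq]; exact ih _

theorem pvRows_eq (l : List String) (acc : List String) :
    pvRows l (acc, acc) = (gRows l acc, gRows l acc) := by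
  induction l generalizing acc with
  | nil => rfl
  | cons a t ih =>
    show pvRows t (t.foldl (fun st b => pvEmit st (pvJoin a b)) (pvEmit (acc, acc) a)) = _
    rw [pvEmit_eq, foldl_pvEmit]
    exact ih _

theorem sorted_pair (a b : String) :
    PySem.List.sorted [a, b] (fun x => x) false = if a ≤ b then [a, b] else [b, a] := by
  split
  · exact PySem.List.sorted_id_eq_of_perm_of_pairwise [a, b] [a, b] (List.Perm.refl _)
      (List.pairwise_pair.mpr ‹a ≤ b›)
  · have h : b ≤ a := (le_total a b).resolve_left ‹¬ a ≤ b›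
    exact PySem.List.sorted_id_eq_of_perm_of_pairwise [a, b] [b, a] (List.Perm.swap a b [])
      (List.pairwise_pair.mpr h)

theorem join_sorted_pair (a b : String) :
    (PySem.List.pyGetD (PySem.List.sorted [a, b] (fun x => x) false) 0 ""
      ++ "^" ++ PySem.List.pyGetD (PySem.List.sorted [a, b] (fun x => x) false) 1 "")
      = pvJoin a b := by
  rw [sorted_pair]; unfold pvJoin
  split <;> simp [PySem.List.pyGetD]

/-- A's row for key `a`: inner loop over the whole key list, value form. -/
def aRow (ks acc : List String) (a : String) : List String :=
  ks.foldl (fun acc b => dstep acc (if a = b then a else pvJoin a b)) acc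

/-- A's nested range loops, on a Nodup key list, are the value-level double fold. -/
theorem A_loops_eq_rows (ks : List String) (hnd : ks.Nodup) :
    (PySem.List.pyRange 0 (ks.length : Int) 1).foldl (fun primaryKeys i =>
      (PySem.List.pyRange 0 (ks.length : Int) 1).foldl (fun primaryKeys j =>
        let primaryKey :=
          if i = j then PySem.List.pyGetD ks i ""
          else
            let twoKeys := PySem.List.sorted
              [PySem.List.pyGetD ks i "", PySem.List.pyGetD ks j ""] (fun x => x) false
            PySem.List.pyGetD twoKeys 0 "" ++ "^" ++ PySem.List.pyGetD twoKeys 1 ""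
        if primaryKey ∈ primaryKeys then primaryKeys else primaryKeys ++ [primaryKey])
        primaryKeys) []
    = ks.foldl (fun acc a => aRow ks acc a) [] := by
  have hbody : ∀ (init : List String) (i : Int), i ∈ PySem.List.pyRange 0 (ks.length : Int) 1 →
      (PySem.List.pyRange 0 (ks.length : Int) 1).foldl (fun primaryKeys j =>
        let primaryKey :=
          if i = j then PySem.List.pyGetD ks i ""
          else
            let twoKeys := PySem.List.sorted
              [PySem.List.pyGetD ks i "", PySem.List.pyGetD ks j ""] (fun x => x) false
            PySem.List.pyGetD twoKeys 0 "" ++ "^" ++ PySem.List.pyGetD twoKeys 1 ""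
        if primaryKey ∈ primaryKeys then primaryKeys else primaryKeys ++ [primaryKey]) init
      = aRow ks init (PySem.List.pyGetD ks i "") := by
    intro init i hi
    rw [PySem.List.mem_pyRange_one] at hi
    have step1 : ∀ (acc : List String) (j : Int), j ∈ PySem.List.pyRange 0 (ks.length : Int) 1 →
        (let primaryKey :=
          if i = j then PySem.List.pyGetD ks i ""
          else
            let twoKeys := PySem.List.sorted
              [PySem.List.pyGetD ks i "", PySem.List.pyGetD ks j ""] (fun x => x) false
            PySem.List.pyGetD twoKeys 0 "" ++ "^" ++ PySem.List.pyGetD twoKeys 1 ""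
         if primaryKey ∈ acc then acc else acc ++ [primaryKey])
        = dstep acc (if PySem.List.pyGetD ks i "" = PySem.List.pyGetD ks j ""
            then PySem.List.pyGetD ks i "" else pvJoin (PySem.List.pyGetD ks i "") (PySem.List.pyGetD ks j "")) := by
      intro acc j hj
      rw [PySem.List.mem_pyRange_one] at hj
      have hij : (i = j) ↔ (PySem.List.pyGetD ks i "" = PySem.List.pyGetD ks j "") := by
        constructor
        · rintro rfl; rfl
        · intro h
          rw [PySem.List.pyGetD_eq_getElem ks "" hi.1 hi.2, PySem.List.pyGetD_eq_getElem ks "" hj.1 hj.2] at h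
          have := (List.Nodup.getElem_inj_iff hnd).mp h
          omega
      simp only [dstep, join_sorted_pair]
      by_cases h : i = j
      · rw [if_pos h, if_pos (hij.mp h)]
      · rw [if_neg h, if_neg (fun hv => h (hij.mpr hv))]
    rw [PySem.List.foldl_congr_mem _ _ _ _ (fun acc => step1 acc),
      PySem.List.foldl_pyRange_zero_pyGetD' ks ""
        (fun acc b => dstep acc (if PySem.List.pyGetD ks i "" = b then PySem.List.pyGetD ks i "" else pvJoin (PySem.List.pyGetD ks i "") b)) init]
    unfold aRow
    apply PySem.List.foldl_congr_mem
    intro acc b _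
    by_cases h : PySem.List.pyGetD ks i "" = b
    · rw [if_pos h]
    · rw [if_neg h]
  calc
    _ = (PySem.List.pyRange 0 (ks.length : Int) 1).foldl
          (fun acc i => aRow ks acc (PySem.List.pyGetD ks i "")) [] := by
        apply PySem.List.foldl_congr_mem
        intro acc i hi; exact hbody acc i hi
    _ = ks.foldl (fun acc a => aRow ks acc a) [] := by
        exact PySem.List.foldl_pyRange_zero_pyGetD' ks "" (fun acc a => aRow ks acc a) []

/-- Main: processing a suffix of the Nodup key list, A's full rows equal B's triangular rows,
    provided all cross pairs with the already-processed prefix are in the accumulator. -/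
theorem rows_eq (ks : List String) (hnd : ks.Nodup) :
    ∀ (suf pre acc : List String), ks = pre ++ suf →
      (∀ e ∈ pre, ∀ x ∈ suf, pvJoin e x ∈ acc) →
      suf.foldl (fun acc a => aRow ks acc a) acc = gRows suf acc := by
  intro suf
  induction suf with
  | nil => intro pre acc _ _; rfl
  | cons a rest ih =>
    intro pre acc hks hinv
    have hndks := hnd
    rw [hks] at hndks
    have hane : ∀ b ∈ pre, a ≠ b := by
      intro b hb heq
      exact (List.disjoint_of_nodup_append hndks) hb (by simp [heq])
    have harow : aRow ks acc a
        = rest.foldl (fun acc b => dstep acc (pvJoin a b)) (dstep acc a) := by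
      unfold aRow
      rw [hks]
      rw [List.foldl_append]
      have hpre : pre.foldl (fun acc b => dstep acc (if a = b then a else pvJoin a b)) acc = acc := by
        apply foldl_dstep_of_forall_mem
        intro b hb
        rw [if_neg (hane b hb), pvJoin_comm]
        exact hinv b hb a (by simp)
      rw [hpre]
      simp only [List.foldl_cons, if_pos]
      apply PySem.List.foldl_congr_mem
      intro acc' b hb
      have : a ≠ b := by
        have h2 := (List.nodup_append.mp hndks).2.1
        simp only [List.nodup_cons] at h2
        exact fun h => h2.1 (h ▸ hb)
      rw [if_neg this]
    simp only [List.foldl_cons, harow]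
    show _ = gRows (a :: rest) acc
    have hg : gRows (a :: rest) acc
        = gRows rest (rest.foldl (fun acc b => dstep acc (pvJoin a b)) (dstep acc a)) := rfl
    rw [hg]
    apply ih (pre ++ [a])
    · simp [hks]
    · intro e he x hx
      rcases List.mem_append.mp he with he | he
      · exact mem_foldl_dstep (mem_dstep (hinv e he x (by simp [hx])))
      · simp only [List.mem_singleton] at he
        subst he
        exact mem_foldl_dstep_of_mem hx

theorem keylist_eq (l ignores : List String) :
    l.foldl (fun acc k => if k ∈ ignores then acc else acc ++ [k]) []
      = l.filter (fun k => !(ignores.contains k)) := by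
  have hfe : (fun (acc : List String) (k : String) => if k ∈ ignores then acc else acc ++ [k])
      = (fun acc k => if (!(ignores.contains k)) = true then acc ++ [k] else acc) := by
    funext acc k
    by_cases h : k ∈ ignores <;> simp [h]
  rw [hfe, PySem.List.foldl_append_if_eq_filter]
  simp

-- ===== VERDICT (by name: the statement is the Claim_ definition above) =====
theorem read_primary_keys_spec : Claim_equal_read_primary_keys := by
  intro state ignores _
  unfold Spec_read_primary_keys read_primary_keys read_primary_keys_alt
  rw [keylist_eq]
  set ks := ((PySem.Dict.ofList state).keys).filter (fun k => !(ignores.contains k)) with hksdef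
  have hnd : ks.Nodup := (PySem.Dict.nodup_keys_ofList state).filter _
  rw [A_loops_eq_rows ks hnd, rows_eq ks hnd ks [] [] rfl (by intro e he; cases he)]
  show gRows ks [] = (pvRows ks ([], [])).2
  rw [pvRows_eq]
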